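-- pv_equiv track=rewrite | github.com/franpanteli/CodingNomads-python-101 | labs/resources/12_user-input-string-formatting/12_04_nice_welcome.py | first_name_return
-- ===== SOURCE A (Python) =====
-- def first_name_return(example="First Second"):
--     boolean = True
--     return_string = ""
--     for char in example:
--         if char == " ":
--             boolean = False
--             pass
--         if (char.isalpha()) and (boolean == True):
--             return_string += char
--     return return_string
-- ===== SOURCE B (Python) =====
-- def first_name_return(example="First Second"):
--     i = example.find(" ")
--     prefix = example if i == -1 else example[:i]
--     return "".join(c for c in prefix if c.isalpha())
-- ===== Notes on version B (the rewrite author's own statement) =====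
-- stated objective: simpler
-- what changed: Replaced the single loop with a sticky boolean flag by a two-stage extract-then-filter: find the first space, slice the prefix, and join its alphabetic characters.
import Mathlib
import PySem

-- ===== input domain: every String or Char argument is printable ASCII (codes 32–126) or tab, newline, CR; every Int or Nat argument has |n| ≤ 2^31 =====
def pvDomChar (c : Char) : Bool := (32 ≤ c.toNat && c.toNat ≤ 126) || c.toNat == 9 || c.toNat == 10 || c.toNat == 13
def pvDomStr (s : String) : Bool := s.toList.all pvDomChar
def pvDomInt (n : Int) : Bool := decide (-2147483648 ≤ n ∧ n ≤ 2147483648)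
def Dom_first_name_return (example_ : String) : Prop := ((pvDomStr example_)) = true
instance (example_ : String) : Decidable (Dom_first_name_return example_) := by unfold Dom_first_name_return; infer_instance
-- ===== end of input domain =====

-- B replaces A's single loop with a sticky boolean flag by find-first-space, slice the prefix, filter alphabetic: a simpler two-stage decomposition.


-- ===== PORT A =====
-- loop body of A, state (boolean, return_string); branches in source order
def stepA (st : Bool × String) (char : Char) : Bool × String :=
  let b := if char = ' ' then false else st.1
  let r := if PySem.Chars.isalpha char && b then st.2 ++ char.toString else st.2
  (b, r)

def first_name_return (example_ : String) : String :=
  (example_.toList.foldl stepA (true, "")).2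

-- ===== PORT B =====
-- i = example.find(" "); prefix = example if i == -1 else example[:i]; "".join of the alpha filter
def first_name_return_alt (example_ : String) : String :=
  let i := PySem.Str.find example_ " "
  let prefix_ := if i = -1 then example_
    else String.ofList (PySem.List.slice example_.toList none (some i))
  String.ofList (prefix_.toList.filter (fun c => PySem.Chars.isalpha c))

-- ===== PRECONDITION & SPEC =====
def Spec_first_name_return (example_ : String) (out : String) : Prop := out = first_name_return_alt example_
instance (example_ : String) (out : String) : Decidable (Spec_first_name_return example_ out) := by unfold Spec_first_name_return; infer_instance

-- ===== CLAIM (what is proved, stated in full; the proofs are below) =====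
def Claim_equal_first_name_return : Prop := ∀ (example_ : String), Dom_first_name_return example_ → Spec_first_name_return example_ (first_name_return example_)

-- ===== LEMMAS AND PROOFS =====

-- once A's flag is false the loop never changes the state again
theorem foldlA_false (l : List Char) (s : String) :
    l.foldl stepA (false, s) = (false, s) := by
  induction l generalizing s with
  | nil => rfl
  | cons c t ih =>
    have h : stepA (false, s) c = (false, s) := by simp [stepA]
    rw [List.foldl_cons, h, ih]

-- with the flag true, A's loop appends exactly the alpha chars of the prefix before the first space
theorem foldlA_true (l : List Char) (s : String) :
    ((l.foldl stepA (true, s)).2).toList =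
      s.toList ++ ((l.takeWhile (fun c => c ≠ ' ')).filter (fun c => PySem.Chars.isalpha c)) := by
  induction l generalizing s with
  | nil => simp
  | cons c t ih =>
    by_cases hc : c = ' '
    · subst hc
      have h : stepA (true, s) ' ' = (false, s) := by simp [stepA, PySem.Chars.isalpha]
      rw [List.foldl_cons, h, foldlA_false]
      simp
    · by_cases ha : PySem.Chars.isalpha c = true
      · have h : stepA (true, s) c = (true, s ++ c.toString) := by simp [stepA, hc, ha]
        rw [List.foldl_cons, h, ih]
        simp [hc, ha]
      · have h : stepA (true, s) c = (true, s) := by simp [stepA, hc, ha]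
        rw [List.foldl_cons, h, ih]
        simp [hc, ha]

-- first-space characterisation of find.go for the single-char pattern [' ']
theorem findgo_space (l : List Char) (k : Nat) :
    PySem.Chars.find.go [' '] l k =
      if ' ' ∈ l then ((k + (l.takeWhile (fun c => c ≠ ' ')).length : Nat) : Int) else -1 := by
  induction l generalizing k with
  | nil => simp [PySem.Chars.find.go]
  | cons c t ih =>
    rw [PySem.Chars.find.go]
    by_cases hc : c = ' '
    · subst hc
      simp [List.isPrefixOf]
    · have hpre : List.isPrefixOf [' '] (c :: t) = false := by
        simp [List.isPrefixOf]
        exact fun h => absurd h.symm hc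
      rw [hpre]
      simp only [Bool.false_eq_true, if_false, ih]
      by_cases hmem : ' ' ∈ t
      · have hm : ' ' ∈ c :: t := List.mem_cons_of_mem _ hmem
        rw [if_pos hmem, if_pos hm]
        simp [hc]
        omega
      · have hm : ' ' ∉ c :: t := by simp [List.mem_cons, Ne.symm hc, hmem]
        rw [if_neg hmem, if_neg hm]

theorem take_takeWhile_length {α : Type} (p : α → Bool) (l : List α) :
    l.take ((l.takeWhile p).length) = l.takeWhile p := by
  induction l with
  | nil => rfl
  | cons c t ih =>
    by_cases h : p c = true
    · simp [h, ih]
    · simp [h]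

-- B computes the same list: filter over the prefix before the first space
theorem alt_toList (example_ : String) :
    (first_name_return_alt example_).toList =
      (example_.toList.takeWhile (fun c => c ≠ ' ')).filter (fun c => PySem.Chars.isalpha c) := by
  rw [show first_name_return_alt example_ =
      String.ofList ((if PySem.Str.find example_ " " = -1 then example_
          else String.ofList (PySem.List.slice example_.toList none (some (PySem.Str.find example_ " ")))).toList.filter
        (fun c => PySem.Chars.isalpha c)) from rfl]
  rw [PySem.Str.find_eq]
  have hsp : (" " : String).toList = [' '] := rfl
  rw [hsp, PySem.Chars.find, findgo_space]
  by_cases hmem : ' ' ∈ example_.toList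
  · rw [if_pos hmem]
    have hne : (((0 + (example_.toList.takeWhile (fun c => c ≠ ' ')).length : Nat)) : Int) ≠ -1 := by
      omega
    rw [if_neg hne]
    rw [PySem.List.slice_to_natCast]
    simp [take_takeWhile_length]
  · rw [if_neg hmem, if_pos rfl]
    have hself : example_.toList.takeWhile (fun c => c ≠ ' ') = example_.toList := by
      rw [List.takeWhile_eq_self_iff]
      intro x hx
      simp only [decide_eq_true_eq]
      intro hx'
      exact hmem (hx' ▸ hx)
    rw [hself]
    simp

-- ===== VERDICT (by name: the statement is the Claim_ definition above) =====
theorem first_name_return_spec : Claim_equal_first_name_return := by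
  intro example_ _hdom
  unfold Spec_first_name_return
  rw [← String.toList_inj, alt_toList]
  unfold first_name_return
  rw [foldlA_true]
  rfl
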